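-- pv_equiv track=rewrite | github.com/cbensonIstari/deeplynx-istari-modules | use-cases/check-thermal-compliance/check_thermal_compliance.py | find_propulsion_record
-- ===== SOURCE A (Python) =====
-- def find_propulsion_record(records):
--     """Find the Propulsion subsystem record for graph rendering."""
--     # Prefer the actual Propulsion Subsystem class record
--     for r in records:
--         if r.get("class_name") == "Subsystem" and "Propulsion" in r.get("name", ""):
--             return r["id"]
--     # Fallback: any subsystem
--     for r in records:
--         if r.get("class_name") == "Subsystem":
--             return r["id"]
--     return records[0]["id"]
-- ===== SOURCE B (Python) =====
-- def find_propulsion_record(records):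
--     """Find the Propulsion subsystem record for graph rendering (single pass)."""
--     fallback = None
--     for r in records:
--         if r.get("class_name") == "Subsystem":
--             if "Propulsion" in r.get("name", ""):
--                 return r["id"]
--             if fallback is None:
--                 fallback = r
--     if fallback is not None:
--         return fallback["id"]
--     return records[0]["id"]
-- ===== Notes on version B (the rewrite author's own statement) =====
-- stated objective: simpler
-- what changed: Replaces A's two sequential scans (Propulsion pass, then a full rescan for any Subsystem) with one pass that caches the first plain Subsystem record as a lazy fallback and returns immediately on a Propulsion match.
import Mathlib
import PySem

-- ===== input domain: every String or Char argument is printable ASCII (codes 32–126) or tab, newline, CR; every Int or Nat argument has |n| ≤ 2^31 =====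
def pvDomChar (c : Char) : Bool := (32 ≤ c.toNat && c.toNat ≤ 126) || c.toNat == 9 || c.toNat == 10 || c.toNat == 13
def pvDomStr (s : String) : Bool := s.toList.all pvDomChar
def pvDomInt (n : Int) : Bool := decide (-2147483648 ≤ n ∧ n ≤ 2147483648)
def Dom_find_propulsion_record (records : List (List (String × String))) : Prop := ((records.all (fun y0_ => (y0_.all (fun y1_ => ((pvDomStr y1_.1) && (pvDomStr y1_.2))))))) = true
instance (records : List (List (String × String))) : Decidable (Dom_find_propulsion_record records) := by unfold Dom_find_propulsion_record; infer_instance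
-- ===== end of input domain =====

-- B replaces A's two sequential scans with a single pass caching the first plain
-- Subsystem record as a lazy fallback; objective: simpler (same O(n) cost).


-- ===== PORT A =====
-- helpers shared by both ports: r.get("class_name") == "Subsystem", the Propulsion
-- test, and r["id"] (KeyError excluded by Pre_; the default "" is never reached there)
def pvIsSub (r : List (String × String)) : Bool :=
  (PySem.Dict.mk r).get? "class_name" == some "Subsystem"

def pvIsProp (r : List (String × String)) : Bool :=
  pvIsSub r && PySem.Str.isIn "Propulsion" ((PySem.Dict.mk r).getD "name" "")

def pvId (r : List (String × String)) : String :=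
  (PySem.Dict.mk r).getD "id" ""

-- A, second loop: 'for r in records: if class_name == "Subsystem": return r["id"]',
-- then the final 'return records[0]["id"]' (empty list = IndexError, excluded by Pre_)
def pvALoop2 (records : List (List (String × String))) : List (List (String × String)) → String
  | [] => match records with
          | [] => ""            -- IndexError in Python; outside Pre_
          | r :: _ => pvId r
  | r :: rest => if pvIsSub r then pvId r else pvALoop2 records rest

-- A, first loop: 'if class_name == "Subsystem" and "Propulsion" in name: return r["id"]'
def pvALoop1 (records : List (List (String × String))) : List (List (String × String)) → String
  | [] => pvALoop2 records records
  | r :: rest => if pvIsProp r then pvId r else pvALoop1 records rest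

def find_propulsion_record (records : List (List (String × String))) : String :=
  pvALoop1 records records

-- ===== PORT B =====
-- B's single loop with the cached fallback record (fallback is the record itself;
-- its "id" is only fetched after the loop, exactly as in Source B)
def pvBGo (records : List (List (String × String))) :
    List (List (String × String)) → Option (List (String × String)) → String
  | [], fb => match fb with
              | some f => pvId f
              | none => match records with
                        | [] => ""            -- IndexError in Python; outside Pre_
                        | r :: _ => pvId r
  | r :: rest, fb =>
      if pvIsSub r then
        if PySem.Str.isIn "Propulsion" ((PySem.Dict.mk r).getD "name" "") then pvId r
        else match fb with
             | none => pvBGo records rest (some r)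
             | some f => pvBGo records rest (some f)
      else pvBGo records rest fb

def find_propulsion_record_alt (records : List (List (String × String))) : String :=
  pvBGo records records none

-- ===== PRECONDITION & SPEC =====
-- Pre_ excludes exactly the inputs where A raises: KeyError when the record A would
-- return from lacks an "id" key, and IndexError on the empty list.
def Pre_find_propulsion_record (records : List (List (String × String))) : Prop :=
  match records.find? pvIsProp with
  | some r => (PySem.Dict.mk r).contains "id" = true
  | none =>
    match records.find? pvIsSub with
    | some r => (PySem.Dict.mk r).contains "id" = true
    | none =>
      match records with
      | [] => False
      | r :: _ => (PySem.Dict.mk r).contains "id" = true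

instance (records : List (List (String × String))) : Decidable (Pre_find_propulsion_record records) := by
  unfold Pre_find_propulsion_record
  rcases records.find? pvIsProp with _ | r
  · rcases records.find? pvIsSub with _ | r
    · rcases records with _ | ⟨r, rest⟩ <;> infer_instance
    · infer_instance
  · infer_instance

def pvWitness_find_propulsion_record : (List (List (String × String))) :=
  [[("class_name", "Subsystem"), ("name", "Propulsion Subsystem"), ("id", "42")]]

def Spec_find_propulsion_record (records : List (List (String × String))) (out : String) : Prop := out = find_propulsion_record_alt records
instance (records : List (List (String × String))) (out : String) : Decidable (Spec_find_propulsion_record records out) := by unfold Spec_find_propulsion_record; infer_instance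

-- ===== CLAIM (what is proved, stated in full; the proofs are below) =====
def Claim_equal_find_propulsion_record : Prop := ∀ (records : List (List (String × String))), Dom_find_propulsion_record records → Pre_find_propulsion_record records → Spec_find_propulsion_record records (find_propulsion_record records)

-- ===== LEMMAS AND PROOFS =====

-- characterisation of A's second loop as a first-match search
theorem pvALoop2_eq (records rs : List (List (String × String))) :
    pvALoop2 records rs =
      match rs.find? pvIsSub with
      | some r => pvId r
      | none => match records with | [] => "" | r :: _ => pvId r := by
  induction rs with
  | nil => rfl
  | cons r rest ih =>
    simp only [pvALoop2, List.find?]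
    cases h : pvIsSub r <;> simp [h, ih]

-- characterisation of A's first loop
theorem pvALoop1_eq (records rs : List (List (String × String))) :
    pvALoop1 records rs =
      match rs.find? pvIsProp with
      | some r => pvId r
      | none => pvALoop2 records records := by
  induction rs with
  | nil => rfl
  | cons r rest ih =>
    simp only [pvALoop1, List.find?]
    cases h : pvIsProp r <;> simp [h, ih]

-- characterisation of B's single loop: a Propulsion match in the suffix wins,
-- otherwise the cached fallback, otherwise the first Subsystem of the suffix,
-- otherwise records[0]
theorem pvBGo_eq (records rs : List (List (String × String)))
    (fb : Option (List (String × String))) :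
    pvBGo records rs fb =
      match rs.find? pvIsProp with
      | some r => pvId r
      | none =>
        match fb with
        | some f => pvId f
        | none =>
          match rs.find? pvIsSub with
          | some r => pvId r
          | none => match records with | [] => "" | r :: _ => pvId r := by
  induction rs generalizing fb with
  | nil => cases fb <;> rfl
  | cons r rest ih =>
    simp only [pvBGo, List.find?]
    cases hs : pvIsSub r with
    | false =>
      have hp : pvIsProp r = false := by simp only [pvIsProp, hs, Bool.false_and]
      cases fb <;> simp [hs, hp, ih]
    | true =>
      generalize hpin : PySem.Str.isIn "Propulsion" ((PySem.Dict.mk r).getD "name" "") = b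
      cases b with
      | true =>
        have hp : pvIsProp r = true := by
          simp only [pvIsProp, hs, hpin, Bool.and_self]
        simp [hs, hp]
      | false =>
        have hp : pvIsProp r = false := by
          simp only [pvIsProp, hs, hpin, Bool.and_false]
        cases fb <;> simp [hs, hp, ih]

-- ===== VERDICT (by name: the statement is the Claim_ definition above) =====
theorem find_propulsion_record_spec : Claim_equal_find_propulsion_record := by
  intro records _ _
  unfold Spec_find_propulsion_record find_propulsion_record find_propulsion_record_alt
  rw [pvALoop1_eq, pvALoop2_eq, pvBGo_eq]
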